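-- pv_equiv track=rewrite | github.com/SahilBShah/CS313E | WordSearch.py | make_diagonal
-- ===== SOURCE A (Python) =====
-- def make_diagonal(new_word_search):
--     """
--     Creates a list of the diagonal elements in the word search.
--     """
--
--     temp_diag_list = []
--     diagonal_word_search = []
--
--     #Converts word search into a list of rows by diagonals
--     for i in range(len(new_word_search)):
--         current_diag = new_word_search[i][i]
--         temp_diag_list.append(current_diag)
--     diagonal_word_search.append(temp_diag_list)
--
--     for i in range(1, len(new_word_search)):
--         temp_diag_list = []
--         for j in range(len(new_word_search)-i):
--             current_diag = new_word_search[j][j+i]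
--             temp_diag_list.append(current_diag)
--         diagonal_word_search.append(temp_diag_list)
--     return diagonal_word_search
-- ===== SOURCE B (Python) =====
-- def make_diagonal(new_word_search):
--     """
--     Creates a list of the diagonal elements in the word search.
--     """
--     n = len(new_word_search)
--     buckets = [[] for _ in range(n)]
--     # single row-major pass: element at (r, c) belongs to diagonal c - r
--     for r in range(n):
--         row = new_word_search[r]
--         for c in range(r, n):
--             buckets[c - r].append(row[c])
--     return buckets if buckets else [[]]
-- ===== Notes on version B (the rewrite author's own statement) =====
-- stated objective: alternative
-- what changed: Replaces A's per-diagonal traversal (a dedicated first-diagonal loop plus a nested loop walking each upper diagonal) with a single row-major pass that scatters each upper-triangle element into a bucket indexed by its diagonal offset c-r.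
import Mathlib
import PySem

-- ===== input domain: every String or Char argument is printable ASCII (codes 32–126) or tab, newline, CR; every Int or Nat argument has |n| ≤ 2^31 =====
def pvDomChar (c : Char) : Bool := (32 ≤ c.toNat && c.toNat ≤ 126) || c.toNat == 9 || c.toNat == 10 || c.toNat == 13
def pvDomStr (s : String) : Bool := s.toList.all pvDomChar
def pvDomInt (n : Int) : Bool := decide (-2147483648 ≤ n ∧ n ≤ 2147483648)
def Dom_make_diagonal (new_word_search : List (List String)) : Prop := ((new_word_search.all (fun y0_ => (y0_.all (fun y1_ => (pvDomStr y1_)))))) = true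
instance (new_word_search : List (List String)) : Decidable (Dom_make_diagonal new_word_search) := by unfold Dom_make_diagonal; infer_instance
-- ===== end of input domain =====

-- B replaces A's per-diagonal traversal with a single row-major pass scattering each
-- upper-triangle element into the bucket for its diagonal offset c-r (alternative decomposition, same cost).

-- matrix[i][j]: exact under Pre_ (every index used is in range, so the defaults never fire)
def pvCell (m : List (List String)) (i j : Int) : String :=
  PySem.List.pyGetD (PySem.List.pyGetD m i []) j ""

-- ===== PORT A =====
def make_diagonal (new_word_search : List (List String)) : List (List String) :=
  let n : Int := new_word_search.length
  let temp_diag_list :=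
    (PySem.List.pyRange 0 n 1).foldl (fun t i => t ++ [pvCell new_word_search i i]) []
  let diagonal_word_search := ([] : List (List String)) ++ [temp_diag_list]
  (PySem.List.pyRange 1 n 1).foldl (fun d i =>
    d ++ [(PySem.List.pyRange 0 (n - i) 1).foldl
            (fun t j => t ++ [pvCell new_word_search j (j + i)]) []]) diagonal_word_search

-- ===== PORT B =====
def make_diagonal_alt (new_word_search : List (List String)) : List (List String) :=
  let n : Int := new_word_search.length
  let buckets := (PySem.List.pyRange 0 n 1).map (fun _ => ([] : List String))
  let buckets :=
    (PySem.List.pyRange 0 n 1).foldl (fun bs r =>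
      let row := PySem.List.pyGetD new_word_search r []
      (PySem.List.pyRange r n 1).foldl (fun bs c =>
        bs.modify (c - r).toNat (fun b => b ++ [PySem.List.pyGetD row c ""])) bs) buckets
  if buckets.isEmpty then [[]] else buckets

-- ===== PRECONDITION & SPEC =====
-- A raises IndexError when some row is shorter than the number of rows; Pre_ is exactly A's return domain.
def Pre_make_diagonal (new_word_search : List (List String)) : Prop :=
  ∀ row ∈ new_word_search, new_word_search.length ≤ row.length
instance (new_word_search : List (List String)) : Decidable (Pre_make_diagonal new_word_search) := by
  unfold Pre_make_diagonal; infer_instance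

def pvWitness_make_diagonal : List (List String) := [["a", "b"], ["c", "d"]]

def Spec_make_diagonal (new_word_search : List (List String)) (out : List (List String)) : Prop := out = make_diagonal_alt new_word_search
instance (new_word_search : List (List String)) (out : List (List String)) : Decidable (Spec_make_diagonal new_word_search out) := by unfold Spec_make_diagonal; infer_instance

-- ===== CLAIM (what is proved, stated in full; the proofs are below) =====
def Claim_equal_make_diagonal : Prop := ∀ (new_word_search : List (List String)), Dom_make_diagonal new_word_search → Pre_make_diagonal new_word_search → Spec_make_diagonal new_word_search (make_diagonal new_word_search)

-- ===== LEMMAS AND PROOFS =====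

-- the common reference value: diagonal at offset i of the matrix, in row order
def pvDiag (m : List (List String)) (n i : Nat) : List String :=
  (List.range (n - i)).map (fun j : Nat => pvCell m (j : Int) ((j : Int) + (i : Int)))

def pvRef (m : List (List String)) : List (List String) :=
  pvDiag m m.length 0 ::
    (List.range (m.length - 1)).map (fun k : Nat => pvDiag m m.length (k + 1))

-- ---- A equals the reference ----
lemma make_diagonal_eq_ref (m : List (List String)) : make_diagonal m = pvRef m := by
  unfold make_diagonal pvRef
  simp only []
  rw [PySem.List.pyRange_one 0 (m.length : Int),
      PySem.List.pyRange_one 1 (m.length : Int)]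
  rw [show (((m.length : Int) - 0).toNat) = m.length by omega,
      show (((m.length : Int) - 1).toNat) = m.length - 1 by omega]
  rw [List.foldl_map, List.foldl_map]
  rw [PySem.List.foldl_append_singleton_eq_map (fun k : Nat => pvCell m (0 + (k : Int)) (0 + (k : Int)))]
  rw [PySem.List.foldl_append_singleton_eq_map (fun k : Nat =>
        (PySem.List.pyRange 0 ((m.length : Int) - (1 + (k : Int))) 1).foldl
          (fun t j => t ++ [pvCell m j (j + (1 + (k : Int)))]) [])]
  simp only [List.nil_append, List.cons_append]
  congr 1
  · -- main diagonal
    unfold pvDiag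
    simp only [Nat.sub_zero]
    apply List.map_congr_left
    intro j _
    simp
  · -- remaining diagonals
    apply List.map_congr_left
    intro k _
    rw [PySem.List.pyRange_one 0 ((m.length : Int) - (1 + (k : Int)))]
    rw [show (((m.length : Int) - (1 + (k : Int)) - 0).toNat) = m.length - (k + 1) by omega]
    rw [List.foldl_map]
    rw [PySem.List.foldl_append_singleton_eq_map (fun j : Nat =>
          pvCell m (0 + (j : Int)) (0 + (j : Int) + (1 + (k : Int))))]
    unfold pvDiag
    simp only [List.nil_append]
    apply List.map_congr_left
    intro j _
    congr 1
    · omega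
    · omega

-- ---- B's inner loop: scatter row elements at columns [a, b) into buckets (c - r) ----
lemma inner_scatter (row : List String) (r a b : Nat) (hra : r ≤ a) (bs : List (List String)) :
    (PySem.List.pyRange (a : Int) (b : Int) 1).foldl
        (fun bs c => bs.modify (c - (r : Int)).toNat
          (fun x => x ++ [PySem.List.pyGetD row c ""])) bs
    = bs.mapIdx (fun i x =>
        if a - r ≤ i ∧ i < b - r then x ++ [PySem.List.pyGetD row ((r : Int) + (i : Int)) ""] else x) := by
  by_cases hba : b ≤ a
  case pos =>
    rw [PySem.List.pyRange_one_eq_nil (by exact_mod_cast hba)]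
    simp only [List.foldl_nil]
    apply List.ext_getElem (by simp)
    intro i h1 h2
    rw [List.getElem_mapIdx]
    rw [if_neg (by omega)]
  case neg =>
    rw [PySem.List.pyRange_one_cons (by exact_mod_cast (show a < b by omega))]
    rw [List.foldl_cons]
    rw [show ((a : Int) + 1) = ((a + 1 : Nat) : Int) by push_cast; ring]
    rw [inner_scatter row r (a + 1) b (by omega)]
    rw [show (((a : Int) - (r : Int)).toNat) = a - r by omega]
    apply List.ext_getElem (by simp)
    intro i h1 h2
    simp only [List.getElem_mapIdx]
    rw [List.getElem_modify]
    by_cases hi : a - r = i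
    · subst hi
      rw [if_pos rfl]
      rw [if_neg (by omega), if_pos (by omega)]
      congr 3
      omega
    · rw [if_neg hi]
      by_cases hc : a + 1 - r ≤ i ∧ i < b - r
      · rw [if_pos hc, if_pos (by omega)]
      · rw [if_neg hc, if_neg (by omega)]
termination_by b - a

-- ---- B's outer loop: buckets after processing rows [0, r) ----
lemma outer_scatter (m : List (List String)) (r : Nat) (hr : r ≤ m.length) :
    (PySem.List.pyRange 0 (r : Int) 1).foldl (fun bs rr =>
        (PySem.List.pyRange rr (m.length : Int) 1).foldl (fun bs c =>
          bs.modify (c - rr).toNat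
            (fun x => x ++ [PySem.List.pyGetD (PySem.List.pyGetD m rr []) c ""])) bs)
      ((PySem.List.pyRange 0 (m.length : Int) 1).map (fun _ => ([] : List String)))
    = (List.range m.length).map (fun i =>
        (List.range (min (m.length - i) r)).map
          (fun j : Nat => pvCell m (j : Int) ((j : Int) + (i : Int)))) := by
  induction r with
  | zero =>
    simp only [Nat.cast_zero]
    rw [PySem.List.pyRange_one_eq_nil (le_refl 0)]
    simp only [List.foldl_nil]
    rw [PySem.List.pyRange_one 0 (m.length : Int)]
    rw [show (((m.length : Int) - 0).toNat) = m.length by omega]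
    apply List.ext_getElem (by simp)
    intro i h1 h2
    simp
  | succ r ih =>
    rw [show ((r + 1 : Nat) : Int) = (r : Int) + 1 by push_cast; ring]
    rw [PySem.List.pyRange_one_succ_right (by omega), List.foldl_append]
    rw [ih (by omega)]
    simp only [List.foldl_cons, List.foldl_nil]
    rw [inner_scatter (PySem.List.pyGetD m (r : Int) []) r r m.length (le_refl r)]
    apply List.ext_getElem (by simp)
    intro i h1 h2
    simp only [List.getElem_mapIdx, List.getElem_map, List.getElem_range]
    by_cases hc : r - r ≤ i ∧ i < m.length - r
    · rw [if_pos hc]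
      have h3 : min (m.length - i) r = r := by omega
      have h4 : min (m.length - i) (r + 1) = r + 1 := by omega
      rw [h3, h4, List.range_succ, List.map_append]
      simp only [List.map_cons, List.map_nil]
      rfl
    · rw [if_neg hc]
      have h3 : min (m.length - i) r = m.length - i := by omega
      have h4 : min (m.length - i) (r + 1) = m.length - i := by omega
      rw [h3, h4]

-- ---- B equals the reference ----
lemma make_diagonal_alt_eq_ref (m : List (List String)) : make_diagonal_alt m = pvRef m := by
  unfold make_diagonal_alt pvRef
  simp only []
  rw [outer_scatter m m.length (le_refl _)]
  by_cases h0 : m.length = 0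
  · simp [h0, pvDiag]
  · rw [if_neg (by simp [h0])]
    obtain ⟨n', hn⟩ : ∃ n', m.length = n' + 1 := ⟨m.length - 1, by omega⟩
    rw [hn, List.range_succ_eq_map]
    simp only [List.map_cons, List.map_map, Nat.add_sub_cancel]
    congr 1
    · unfold pvDiag
      rw [show min (n' + 1 - 0) (n' + 1) = n' + 1 - 0 from by omega]
    · apply List.map_congr_left
      intro k _
      simp only [Function.comp]
      unfold pvDiag
      simp only [Nat.succ_eq_add_one]
      rw [show min (n' + 1 - (k + 1)) (n' + 1) = n' + 1 - (k + 1) from by omega]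

-- ===== VERDICT (by name: the statement is the Claim_ definition above) =====
theorem make_diagonal_spec : Claim_equal_make_diagonal := by
  intro m _ _
  unfold Spec_make_diagonal
  rw [make_diagonal_eq_ref, make_diagonal_alt_eq_ref]
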